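-- pv_equiv track=rewrite | github.com/LeeGukHeon/AutoLife | scripts/analyze_stagef_trade_deep_dive.py | group_by_market
-- ===== SOURCE A (Python) =====
-- from typing import Any, Dict, Iterable, List, Optional, Tuple
--
-- def group_by_market(rows: List[Dict[str, Any]], ts_key: str) -> Dict[str, List[Dict[str, Any]]]:
--     grouped: Dict[str, List[Dict[str, Any]]] = {}
--     for row in rows:
--         market = str(row.get("market", "")).strip().upper()
--         if not market:
--             continue
--         grouped.setdefault(market, []).append(row)
--     for market in grouped:
--         grouped[market].sort(key=lambda x: int(x.get(ts_key, 0)))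
--     return grouped
-- ===== SOURCE B (Python) =====
-- from typing import Any, Dict, List
--
--
-- def group_by_market(rows: List[Dict[str, Any]], ts_key: str) -> Dict[str, List[Dict[str, Any]]]:
--     # One global stable sort instead of per-bucket sorts; one grouping pass afterwards.
--     grouped: Dict[str, List[Dict[str, Any]]] = {}
--     kept = []
--     for row in rows:
--         market = str(row.get("market", "")).strip().upper()
--         if market:
--             if market not in grouped:
--                 grouped[market] = []
--             kept.append((market, row))
--     kept.sort(key=lambda mr: int(mr[1].get(ts_key, 0)))
--     for market, row in kept:
--         grouped[market].append(row)
--     return grouped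
-- ===== Notes on version B (the rewrite author's own statement) =====
-- stated objective: alternative
-- what changed: B replaces A's group-then-sort-each-bucket with a filter pass, one global stable sort of all kept rows by timestamp, and a single grouping pass (key order fixed by the first pass); stability of the sort makes the buckets identical.
import Mathlib
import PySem

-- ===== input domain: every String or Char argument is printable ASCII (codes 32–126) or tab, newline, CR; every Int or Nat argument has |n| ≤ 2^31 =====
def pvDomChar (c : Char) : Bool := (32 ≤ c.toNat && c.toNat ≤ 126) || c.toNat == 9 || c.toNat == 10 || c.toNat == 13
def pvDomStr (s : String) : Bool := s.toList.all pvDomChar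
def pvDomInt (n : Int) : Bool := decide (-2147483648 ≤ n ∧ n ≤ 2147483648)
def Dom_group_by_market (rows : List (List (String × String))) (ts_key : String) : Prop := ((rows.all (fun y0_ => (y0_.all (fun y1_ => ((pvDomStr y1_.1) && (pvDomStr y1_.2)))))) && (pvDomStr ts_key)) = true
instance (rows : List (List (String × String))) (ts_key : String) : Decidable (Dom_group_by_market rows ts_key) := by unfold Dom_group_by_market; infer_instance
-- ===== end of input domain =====

-- B replaces A's group-then-sort-each-bucket by filter, ONE global stable sort, then a single grouping pass (same result; alternative decomposition).

-- shared helpers (both Pythons contain these very expressions)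
-- market = str(row.get("market", "")).strip().upper()
def pvMkt (row : List (String × String)) : String :=
  PySem.Str.upper (PySem.Str.strip ((PySem.Dict.mk row).getD "market" ""))

-- int(x.get(ts_key, 0)) : none = ValueError (excluded by Pre_); missing key gives int 0
def pvTs? (ts_key : String) (row : List (String × String)) : Option Int :=
  match (PySem.Dict.mk row).get? ts_key with
  | some s => PySem.Int.ofStr? s
  | none => some 0

def pvTs (ts_key : String) (row : List (String × String)) : Int :=
  (pvTs? ts_key row).getD 0

-- ===== PORT A =====
def group_by_market (rows : List (List (String × String))) (ts_key : String) : List (String × List (List (String × String))) :=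
  let grouped := rows.foldl
    (fun (d : PySem.Dict String (List (List (String × String)))) row =>
      let market := pvMkt row
      if market = "" then d
      else d.modify market [] (fun l => l ++ [row]))   -- grouped.setdefault(market, []).append(row)
    PySem.Dict.empty
  -- for market in grouped: grouped[market].sort(key=...)
  grouped.items.map (fun p => (p.1, PySem.List.sorted p.2 (fun x => pvTs ts_key x)))

-- ===== PORT B =====
def group_by_market_alt (rows : List (List (String × String))) (ts_key : String) : List (String × List (List (String × String))) :=
  let st := rows.foldl
    (fun (st : PySem.Dict String (List (List (String × String))) × List (String × List (String × String))) row =>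
      let market := pvMkt row
      if market = "" then st
      else ((if st.1.contains market then st.1 else st.1.insert market []), st.2 ++ [(market, row)]))
    (PySem.Dict.empty, [])
  let sortedKept := PySem.List.sorted st.2 (fun mr => pvTs ts_key mr.2)
  (sortedKept.foldl (fun d mr => d.modify mr.1 [] (fun l => l ++ [mr.2])) st.1).items

-- ===== PRECONDITION & SPEC =====
-- Pre_ excludes exactly the inputs where Python raises ValueError: a row with a non-empty
-- market whose ts_key value is not an int-parsable string (both A and B call int() there).
def Pre_group_by_market (rows : List (List (String × String))) (ts_key : String) : Prop :=
  ∀ row ∈ rows,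
    PySem.Str.upper (PySem.Str.strip ((PySem.Dict.mk row).getD "market" "")) = "" ∨
    (((PySem.Dict.mk row).get? ts_key).all fun s => (PySem.Int.ofStr? s).isSome) = true
instance (rows : List (List (String × String))) (ts_key : String) : Decidable (Pre_group_by_market rows ts_key) := by unfold Pre_group_by_market; infer_instance

def pvWitness_group_by_market : (List (List (String × String))) × String :=
  ([[("market", "btc"), ("ts", "2")], [("market", " eth "), ("ts", "1")], [("market", "btc"), ("ts", "1")], [("note", "x")]], "ts")

def Spec_group_by_market (rows : List (List (String × String))) (ts_key : String) (out : List (String × List (List (String × String)))) : Prop := out = group_by_market_alt rows ts_key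
instance (rows : List (List (String × String))) (ts_key : String) (out : List (String × List (List (String × String)))) : Decidable (Spec_group_by_market rows ts_key out) := by unfold Spec_group_by_market; infer_instance

-- ===== CLAIM (what is proved, stated in full; the proofs are below) =====
def Claim_equal_group_by_market : Prop := ∀ (rows : List (List (String × String))) (ts_key : String), Dom_group_by_market rows ts_key → Pre_group_by_market rows ts_key → Spec_group_by_market rows ts_key (group_by_market rows ts_key)

-- ===== LEMMAS AND PROOFS =====

abbrev pvRow : Type := List (String × String)

def pvKept (rows : List pvRow) : List (String × pvRow) :=
  rows.filterMap (fun r => if pvMkt r = "" then none else some (pvMkt r, r))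

lemma pvA_fold (rows : List pvRow) (d : PySem.Dict String (List pvRow)) :
    rows.foldl (fun d row => if pvMkt row = "" then d else d.modify (pvMkt row) [] (fun l => l ++ [row])) d
    = (pvKept rows).foldl (fun d p => d.modify p.1 [] (fun l => l ++ [p.2])) d := by
  induction rows generalizing d with
  | nil => rfl
  | cons r rs ih =>
    simp only [pvKept, List.filterMap_cons, List.foldl_cons] at *
    by_cases h : pvMkt r = "" <;> simp [h, ih]

lemma pvB_fold (rows : List pvRow) (d : PySem.Dict String (List pvRow)) (l0 : List (String × pvRow)) :
    rows.foldl (fun st row => if pvMkt row = "" then st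
        else ((if st.1.contains (pvMkt row) then st.1 else st.1.insert (pvMkt row) []), st.2 ++ [(pvMkt row, row)])) (d, l0)
    = ((pvKept rows).foldl (fun d p => if d.contains p.1 then d else d.insert p.1 []) d, l0 ++ pvKept rows) := by
  induction rows generalizing d l0 with
  | nil => simp [pvKept]
  | cons r rs ih =>
    simp only [pvKept, List.filterMap_cons, List.foldl_cons] at *
    by_cases h : pvMkt r = "" <;> simp [h, ih]

lemma pv_sd_getD (l : List (String × pvRow)) (d : PySem.Dict String (List pvRow)) (k : String) :
    (l.foldl (fun d p => if d.contains p.1 then d else d.insert p.1 []) d).getD k [] = d.getD k [] := by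
  induction l generalizing d with
  | nil => rfl
  | cons p ps ih =>
    simp only [List.foldl_cons]
    by_cases hc : d.contains p.1
    · simp [hc, ih]
    · rw [if_neg hc, ih, PySem.Dict.getD_insert]
      split_ifs with hk
      · subst hk; exact (PySem.Dict.getD_of_not_contains d [] (by simpa using hc)).symm
      · rfl

lemma pv_sd_keys (l : List (String × pvRow)) (d : PySem.Dict String (List pvRow)) :
    (l.foldl (fun d p => if d.contains p.1 then d else d.insert p.1 []) d).keys
    = PySem.Set.update d.keys (l.map (·.1)) := by
  induction l generalizing d with
  | nil => rfl
  | cons p ps ih =>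
    simp only [List.foldl_cons, List.map_cons, PySem.Set.update_cons]
    by_cases hc : d.contains p.1
    · rw [if_pos hc, ih, PySem.Set.add_of_mem ((PySem.Dict.contains_iff_mem_keys d p.1).mp hc)]
    · rw [if_neg hc, ih, PySem.Dict.keys_insert_of_not_contains d [] (by simpa using hc),
        PySem.Set.add_of_not_mem (fun hm => hc ((PySem.Dict.contains_iff_mem_keys d p.1).mpr hm))]

lemma pv_update_self (s : PySem.Set String) (xs : List String) (h : ∀ x ∈ xs, x ∈ s) :
    PySem.Set.update s xs = s := by
  rw [PySem.Set.update_eq_append_filter]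
  have hnil : List.filter (fun y => !PySem.Set.contains s y) (PySem.Set.ofList xs) = [] := by
    rw [List.filter_eq_nil_iff]
    intro y hy
    have hm := h y ((PySem.Set.mem_ofList xs y).mp hy)
    simp [hm]
  rw [hnil, List.append_nil]

lemma pv_sorted_append_singleton {α : Type} (l : List α) (x : α) (key : α → Int) :
    PySem.List.sorted (l ++ [x]) key
    = PySem.List.insertBy (fun a b => decide (key a < key b)) x (PySem.List.sorted l key) := by
  rw [PySem.List.sorted_eq_foldl_insertBy, PySem.List.sorted_eq_foldl_insertBy, List.foldl_append]
  rfl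

lemma pv_insertBy_front {β : Type} (b : β → β → Bool) (x : β) (m : List β)
    (h : ∀ z ∈ m, b x z = true) : PySem.List.insertBy b x m = x :: m := by
  cases m with
  | nil => rfl
  | cons h' t => simp [PySem.List.insertBy, h h' (by simp)]

lemma pv_step {β : Type} (K : β → Int) (k : String) (x : String × β) (ys : List (String × β))
    (hys : ys.Pairwise (fun a b => K a.2 ≤ K b.2)) :
    ((PySem.List.insertBy (fun a b => decide (K a.2 < K b.2)) x ys).filter (fun p => p.1 == k)).map (·.2)
    = if x.1 == k then
        PySem.List.insertBy (fun a b => decide (K a < K b)) x.2 ((ys.filter (fun p => p.1 == k)).map (·.2))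
      else (ys.filter (fun p => p.1 == k)).map (·.2) := by
  induction ys with
  | nil => by_cases hx : x.1 == k <;> simp [PySem.List.insertBy, hx]
  | cons y ys ih =>
    have hpw := List.pairwise_cons.mp hys
    by_cases hlt : K x.2 < K y.2
    · rw [pv_insertBy_front _ _ _ (by
        intro z hz
        rcases List.mem_cons.mp hz with rfl | hz'
        · simpa using hlt
        · simpa using lt_of_lt_of_le hlt (hpw.1 z hz'))]
      have hall : ∀ z ∈ (((y :: ys).filter (fun p => p.1 == k)).map (fun p => p.2)), K x.2 < K z := by
        intro z hz
        simp only [List.mem_map, List.mem_filter] at hz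
        obtain ⟨p, ⟨hp, _⟩, rfl⟩ := hz
        rcases List.mem_cons.mp hp with rfl | hp'
        · exact hlt
        · exact lt_of_lt_of_le hlt (hpw.1 p hp')
      by_cases hx : x.1 == k
      · rw [List.filter_cons_of_pos (by simpa using hx), List.map_cons, if_pos hx,
          pv_insertBy_front _ _ _ (fun z hz => by simpa using hall z hz)]
      · rw [List.filter_cons_of_neg (by simpa using hx), if_neg hx]
    · have hrec := ih hpw.2
      rw [show PySem.List.insertBy (fun a b => decide (K a.2 < K b.2)) x (y :: ys) =
          y :: PySem.List.insertBy (fun a b => decide (K a.2 < K b.2)) x ys from by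
        simp [PySem.List.insertBy, hlt]]
      by_cases hy : y.1 == k
      · rw [List.filter_cons_of_pos (by simpa using hy), List.filter_cons_of_pos (by simpa using hy),
          List.map_cons, List.map_cons, hrec]
        by_cases hx : x.1 == k
        · rw [if_pos hx, if_pos hx,
            show PySem.List.insertBy (fun a b => decide (K a < K b)) x.2
                (y.2 :: (ys.filter (fun p => p.1 == k)).map (fun p => p.2))
              = y.2 :: PySem.List.insertBy (fun a b => decide (K a < K b)) x.2
                ((ys.filter (fun p => p.1 == k)).map (fun p => p.2)) from by
            simp [PySem.List.insertBy, hlt]]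
        · rw [if_neg hx, if_neg hx]
      · rw [List.filter_cons_of_neg (by simpa using hy), List.filter_cons_of_neg (by simpa using hy), hrec]

lemma pv_main {β : Type} (K : β → Int) (l : List (String × β)) (k : String) :
    ((PySem.List.sorted l (fun mr => K mr.2)).filter (fun p => p.1 == k)).map (·.2)
    = PySem.List.sorted ((l.filter (fun p => p.1 == k)).map (·.2)) K := by
  induction l using List.reverseRecOn with
  | nil => simp [PySem.List.sorted]
  | append_singleton l x ih =>
    rw [pv_sorted_append_singleton,
      pv_step K k x _ (PySem.List.sorted_pairwise l (fun mr => K mr.2)), List.filter_append, List.map_append]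
    by_cases hx : x.1 == k
    · rw [if_pos hx, ih, List.filter_cons_of_pos (by simpa using hx), List.filter_nil,
        List.map_cons, List.map_nil, pv_sorted_append_singleton]
    · rw [if_neg hx, ih, List.filter_cons_of_neg (by simpa using hx), List.filter_nil,
        List.map_nil, List.append_nil]

theorem pv_assembly (rows : List pvRow) (ts_key : String) :
    group_by_market rows ts_key = group_by_market_alt rows ts_key := by
  show (rows.foldl (fun d row => if pvMkt row = "" then d
          else d.modify (pvMkt row) [] (fun l => l ++ [row])) PySem.Dict.empty).items.map
        (fun p => (p.1, PySem.List.sorted p.2 (fun x => pvTs ts_key x)))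
    = ((PySem.List.sorted
          (rows.foldl (fun st row => if pvMkt row = "" then st
              else ((if st.1.contains (pvMkt row) then st.1 else st.1.insert (pvMkt row) []),
                    st.2 ++ [(pvMkt row, row)])) (PySem.Dict.empty, [])).2
          (fun mr => pvTs ts_key mr.2)).foldl
        (fun d mr => d.modify mr.1 [] (fun l => l ++ [mr.2]))
        ((rows.foldl (fun st row => if pvMkt row = "" then st
              else ((if st.1.contains (pvMkt row) then st.1 else st.1.insert (pvMkt row) []),
                    st.2 ++ [(pvMkt row, row)])) (PySem.Dict.empty, [])).1)).items
  rw [pvA_fold, pvB_fold]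
  simp only [List.nil_append]
  set kept := pvKept rows with hkept
  set dA := kept.foldl (fun d p => d.modify p.1 [] (fun l => l ++ [p.2])) PySem.Dict.empty with hdA
  set d0 := kept.foldl (fun d p => if d.contains p.1 then d else d.insert p.1 []) PySem.Dict.empty with hd0
  set sk := PySem.List.sorted kept (fun mr => pvTs ts_key mr.2) with hsk
  set dF := sk.foldl (fun d p => d.modify p.1 [] (fun l => l ++ [p.2])) d0 with hdF
  have hkA : dA.keys = PySem.Set.ofList (kept.map (fun p => p.1)) := by
    have h := PySem.Dict.keys_foldl_modify_key kept (fun p => p.1) ([] : List pvRow)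
      (fun d p => fun l => l ++ [p.2]) PySem.Dict.empty
    simpa using h
  have hk0 : d0.keys = PySem.Set.ofList (kept.map (fun p => p.1)) := by
    have h := pv_sd_keys kept PySem.Dict.empty
    simpa using h
  have hkF : dF.keys = d0.keys := by
    have h := PySem.Dict.keys_foldl_modify_key sk (fun p => p.1) ([] : List pvRow)
      (fun d p => fun l => l ++ [p.2]) d0
    rw [hdF, h]
    apply pv_update_self
    intro x hx
    simp only [List.mem_map] at hx
    obtain ⟨p, hp, rfl⟩ := hx
    rw [hk0]
    rw [hsk] at hp
    simp only [PySem.List.mem_sorted] at hp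
    exact (PySem.Set.mem_ofList _ _).mpr (List.mem_map_of_mem hp)
  have hndA : dA.keys.Nodup := by rw [hkA]; exact PySem.Set.nodup_ofList _
  have hndF : dF.keys.Nodup := by rw [hkF, hk0]; exact PySem.Set.nodup_ofList _
  rw [PySem.Dict.items_eq_map_keys dA hndA [], PySem.Dict.items_eq_map_keys dF hndF [],
    List.map_map, hkF, hk0, ← hkA]
  apply List.map_congr_left
  intro k _
  have hgA : dA.getD k [] = (kept.filter (fun p => p.1 == k)).map (fun p => p.2) := by
    have h := PySem.Dict.getD_foldl_modify_append kept PySem.Dict.empty k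
    simpa using h
  have hgF : dF.getD k [] = (sk.filter (fun p => p.1 == k)).map (fun p => p.2) := by
    have h := PySem.Dict.getD_foldl_modify_append sk d0 k
    have h3 := pv_sd_getD kept PySem.Dict.empty k
    rw [hdF, h, hd0, h3]
    simp
  show (k, PySem.List.sorted (dA.getD k []) (fun x => pvTs ts_key x)) = (k, dF.getD k [])
  rw [hgA, hgF, hsk]
  exact congrArg (fun v => (k, v)) (pv_main (pvTs ts_key) kept k).symm


-- ===== VERDICT (by name: the statement is the Claim_ definition above) =====
theorem group_by_market_spec : Claim_equal_group_by_market := by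
  intro rows ts_key _ _
  exact pv_assembly rows ts_key
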